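-- pv_equiv track=rewrite | github.com/Yu-ri-62/Yuri-s-coding | 0902/두개의숫자열.py | calc
-- ===== SOURCE A (Python) =====
-- def calc(long, short):
--     max_value = -987654321
--
--     # 긴거에서 짧은거 빼기
--     for i in range(len(long) - len(short) + 1):
--         result = 0
--         for j in range(len(short)):
--             result += long[i + j] * short[j]
--
--         if max_value < result:
--             max_value = result
--
--     return max_value
-- ===== SOURCE B (Python) =====
-- def calc(long, short):
--     # column-wise accumulation: for each short[j], add its contribution to all
--     # window sums at once, then take the max (with A's sentinel floor).
--     n = len(long) - len(short) + 1
--     acc = [0] * max(n, 0)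
--     for j, s in enumerate(short):
--         acc = [a + s * x for a, x in zip(acc, long[j:j + n])]
--     return max([-987654321] + acc)
-- ===== Notes on version B (the rewrite author's own statement) =====
-- stated objective: alternative
-- what changed: A computes each window's dot product with a nested loop and keeps a running max; B accumulates column-wise: for each short[j] it adds s*long[j:j+n] to a vector of all window sums at once (zip/comprehension), then takes one max over the vector (with A's sentinel floor included).
import Mathlib
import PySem

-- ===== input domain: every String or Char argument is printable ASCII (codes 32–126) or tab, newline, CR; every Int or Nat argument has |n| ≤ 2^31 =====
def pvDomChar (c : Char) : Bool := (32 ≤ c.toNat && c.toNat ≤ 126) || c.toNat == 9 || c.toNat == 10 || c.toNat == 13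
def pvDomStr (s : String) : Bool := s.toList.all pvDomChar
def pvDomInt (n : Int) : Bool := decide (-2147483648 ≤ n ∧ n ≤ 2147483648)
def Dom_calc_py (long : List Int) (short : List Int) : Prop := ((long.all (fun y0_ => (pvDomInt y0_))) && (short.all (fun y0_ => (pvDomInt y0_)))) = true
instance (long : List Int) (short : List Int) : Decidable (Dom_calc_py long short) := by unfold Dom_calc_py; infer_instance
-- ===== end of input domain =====

-- B replaces A's window-by-window double loop by a column-wise accumulation
-- (one vector update per short element, then a single max); objective: alternative.

-- ===== PORT A =====
def calc_py (long : List Int) (short : List Int) : Int :=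
  (PySem.List.pyRange 0 ((long.length : Int) - (short.length : Int) + 1) 1).foldl
    (fun max_value i =>
      let result :=
        (PySem.List.pyRange 0 (short.length : Int) 1).foldl
          (fun result j =>
            result + PySem.List.pyGetD long (i + j) 0 * PySem.List.pyGetD short j 0) 0
      if max_value < result then result else max_value)
    (-987654321)

-- ===== PORT B =====
def calc_py_alt (long : List Int) (short : List Int) : Int :=
  let n : Int := (long.length : Int) - (short.length : Int) + 1
  let acc : List Int :=
    (PySem.List.enumerate short 0).foldl
      (fun acc js =>
        (acc.zip (PySem.List.slice long (some js.1) (some (js.1 + n)))).map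
          (fun p => p.1 + js.2 * p.2))
      (List.replicate (max n 0).toNat 0)
  -- max([-987654321] + acc): the list is nonempty, so maxD's default is never used
  PySem.List.maxD ((-987654321) :: acc) (fun x => x) (-987654321)

-- ===== PRECONDITION & SPEC =====
def Spec_calc_py (long : List Int) (short : List Int) (out : Int) : Prop := out = calc_py_alt long short
instance (long : List Int) (short : List Int) (out : Int) : Decidable (Spec_calc_py long short out) := by unfold Spec_calc_py; infer_instance

-- ===== CLAIM (what is proved, stated in full; the proofs are below) =====
def Claim_equal_calc_py : Prop := ∀ (long : List Int) (short : List Int), Dom_calc_py long short → Spec_calc_py long short (calc_py long short)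

-- ===== LEMMAS AND PROOFS =====

/-- the dot product of `P` against `L` starting at position `k` -/
def pvDot (L : List Int) : List Int → Nat → Int
  | [], _ => 0
  | s :: P, k => L.getD k 0 * s + pvDot L P (k + 1)

lemma pv_sum_eq_dot (L : List Int) : ∀ (S : List Int) (i : Nat),
    ((List.range S.length).map (fun j => L.getD (i + j) 0 * S.getD j 0)).sum = pvDot L S i := by
  intro S
  induction S with
  | nil => intro i; simp [pvDot]
  | cons s P ih =>
    intro i
    rw [show (s :: P).length = P.length + 1 from rfl, List.range_succ_eq_map, List.map_cons,
      List.map_map, List.sum_cons]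
    have h2 : ((List.range P.length).map
        ((fun j => L.getD (i + j) 0 * (s :: P).getD j 0) ∘ Nat.succ)).sum
        = pvDot L P (i + 1) := by
      rw [← ih (i + 1)]
      apply congrArg
      apply List.map_congr_left
      intro j _
      simp [Function.comp]
      rw [show i + (j + 1) = i + 1 + j by omega]
      exact Or.inl rfl
    rw [h2]
    simp [pvDot]

lemma pv_take_drop (L : List Int) (j0 N : Nat) (h : j0 + N ≤ L.length) :
    (L.drop j0).take N = (List.range N).map (fun i => L.getD (j0 + i) 0) := by
  apply List.ext_getElem
  · simp; omega
  · intro i h1 h2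
    have hi : i < N := by simpa using h2
    have hL : j0 + i < L.length := by omega
    simp [hL]

lemma pv_fold_nil (L : List Int) (n : Int) :
    ∀ (es : List (Int × Int)),
    es.foldl
      (fun acc js =>
        (acc.zip (PySem.List.slice L (some js.1) (some (js.1 + n)))).map
          (fun p => p.1 + js.2 * p.2)) [] = [] := by
  intro es
  induction es with
  | nil => rfl
  | cons e es ih => simpa using ih

lemma pv_fold_acc (L : List Int) (n : Int) (N : Nat) (hn : n = (N : Int)) :
    ∀ (P : List Int) (j0 : Nat) (f : Nat → Int), j0 + P.length + N ≤ L.length + 1 →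
    (PySem.List.enumerate P (j0 : Int)).foldl
      (fun acc js =>
        (acc.zip (PySem.List.slice L (some js.1) (some (js.1 + n)))).map
          (fun p => p.1 + js.2 * p.2))
      ((List.range N).map f)
    = (List.range N).map (fun i => f i + pvDot L P (j0 + i)) := by
  intro P
  induction P with
  | nil => intro j0 f h; simp [PySem.List.enumerate_nil, pvDot]
  | cons s P ih =>
    intro j0 f h
    rw [PySem.List.enumerate_cons, List.foldl_cons]
    have hslice : PySem.List.slice L (some (j0 : Int)) (some ((j0 : Int) + n))
        = (List.range N).map (fun i => L.getD (j0 + i) 0) := by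
      rw [hn, PySem.List.slice_natCast_add]
      exact pv_take_drop L j0 N (by simp at h; omega)
    rw [hslice, List.zip_map', List.map_map]
    have hc : ((j0 : Int) + 1) = ((j0 + 1 : Nat) : Int) := by push_cast; ring
    rw [hc, ih (j0 + 1) _ (by simp at h ⊢; omega)]
    apply List.map_congr_left
    intro i _
    simp only [Function.comp, pvDot]
    rw [show j0 + 1 + i = j0 + i + 1 by omega]
    ring

lemma pv_if_max (a b : Int) : (if a < b then b else a) = max a b := by
  rw [max_def]
  split_ifs <;> omega

-- ===== VERDICT (by name: the statement is the Claim_ definition above) =====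
theorem calc_py_spec : Claim_equal_calc_py := by
  unfold Claim_equal_calc_py Spec_calc_py
  intro L S _
  unfold calc_py
  simp only [calc_py_alt]
  by_cases hms : S.length ≤ L.length
  case pos =>
    have hn : (L.length : Int) - (S.length : Int) + 1 = ((L.length - S.length + 1 : Nat) : Int) := by
      push_cast; omega
    set N := L.length - S.length + 1 with hN
    rw [hn]
    -- A side: fold of running max over the window dot products
    have hinner : ∀ i : Nat, (PySem.List.pyRange 0 (S.length : Int) 1).foldl
        (fun result j =>
          result + PySem.List.pyGetD L ((i : Int) + j) 0 * PySem.List.pyGetD S j 0) 0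
        = pvDot L S i := by
      intro i
      rw [PySem.List.foldl_add, PySem.List.pyRange_zero_natCast, List.map_map,
        ← pv_sum_eq_dot L S i, zero_add]
      apply congrArg List.sum
      apply List.map_congr_left
      intro j _
      simp only [Function.comp_apply, ← Nat.cast_add, PySem.List.pyGetD_natCast]
    have hA : (PySem.List.pyRange 0 (N : Int) 1).foldl
        (fun max_value i =>
          let result :=
            (PySem.List.pyRange 0 (S.length : Int) 1).foldl
              (fun result j =>
                result + PySem.List.pyGetD L (i + j) 0 * PySem.List.pyGetD S j 0) 0
          if max_value < result then result else max_value)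
        (-987654321)
        = ((List.range N).map (fun i => pvDot L S i)).foldl max (-987654321) := by
      have houter := PySem.List.pyRange_zero_natCast N
      rw [houter, List.foldl_map]
      conv_rhs => rw [List.foldl_map]
      apply PySem.List.foldl_congr_mem
      intro acc i _
      simp only [hinner i, pv_if_max]
    rw [hA]
    -- B side
    have hmax : (max ((N : Int)) 0).toNat = N := by
      rw [max_eq_left (by positivity)]; simp
    have hrep : List.replicate N (0 : Int) = (List.range N).map (fun _ => 0) := by
      simp
    have hpre : 0 + S.length + N ≤ L.length + 1 := by omega
    have hB := pv_fold_acc L ((N : Int)) N rfl S 0 (fun _ => 0) hpre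
    simp only [Nat.cast_zero] at hB
    rw [hmax, hrep, hB]
    simp only [zero_add]
    rw [PySem.List.maxD, PySem.List.max?_id_cons]
    rfl
  case neg =>
    have hneg : (L.length : Int) - (S.length : Int) + 1 ≤ 0 := by
      omega
    have hR : PySem.List.pyRange 0 ((L.length : Int) - (S.length : Int) + 1) 1 = [] := by
      refine List.eq_nil_iff_forall_not_mem.mpr fun x hx => ?_
      have h' := PySem.List.mem_pyRange_one.mp hx
      omega
    have hmax : (max ((L.length : Int) - (S.length : Int) + 1) 0).toNat = 0 := by
      rw [max_eq_right hneg]; rfl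

    rw [hR, hmax, List.foldl_nil, List.replicate_zero, pv_fold_nil]
    rfl
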